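-- pv_equiv track=rewrite | github.com/HamnaKaleem-Scripts/DSA | quick_sort.py | countSpecialSequences
-- ===== SOURCE A (Python) =====
-- def countSpecialSequences(m, n):
--     # Initialize dp array with all zeros
--     dp = [[0] * (m + 1) for _ in range(n + 1)]
--
--     # Base case: There is 1 way to form a sequence of length 1 ending with any number from 1 to m
--     for j in range(1, m + 1):
--         dp[1][j] = 1
--
--     # Calculate dp array using recurrence relation
--     for i in range(2, n + 1):
--         for j in range(1, m + 1):
--             for k in range(1, j):
--                 dp[i][j] += dp[i - 1][k]
--
--     # Sum up the total number of special sequences of length n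
--     total = sum(dp[n][1:])
--
--     return total
-- ===== SOURCE B (Python) =====
-- def countSpecialSequences(m, n):
--     # One rolling row with a running prefix sum: new[j] = sum(row[1:j]) is
--     # accumulated in `run` instead of being rescanned for every j.
--     row = [0] + [1] * m
--     for _ in range(n - 1):
--         new = [0]
--         run = 0
--         for j in range(1, m + 1):
--             new.append(run)
--             run += row[j]
--         row = new
--     return sum(row[1:])
-- ===== Notes on version B (the rewrite author's own statement) =====
-- stated objective: faster
-- what changed: Replaces the (n+1)x(m+1) DP table with its cubic inner rescan of all k<j by a single rolling row updated with a running prefix sum, so each cell costs O(1).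
import Mathlib
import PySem

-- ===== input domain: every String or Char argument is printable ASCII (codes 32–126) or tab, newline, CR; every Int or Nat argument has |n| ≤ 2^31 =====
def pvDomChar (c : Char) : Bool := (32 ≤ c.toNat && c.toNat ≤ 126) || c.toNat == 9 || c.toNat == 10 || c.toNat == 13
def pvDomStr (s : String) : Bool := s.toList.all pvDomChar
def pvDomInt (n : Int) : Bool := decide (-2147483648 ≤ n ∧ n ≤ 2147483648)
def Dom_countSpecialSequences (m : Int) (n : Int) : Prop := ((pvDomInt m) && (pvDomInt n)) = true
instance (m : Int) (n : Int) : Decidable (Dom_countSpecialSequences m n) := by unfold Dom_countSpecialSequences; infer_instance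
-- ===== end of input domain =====

-- B replaces A's DP table (whose inner loop rescans all k < j for every cell) by a single
-- rolling row updated with a running prefix sum: O(n*m) instead of O(n*m^2).

-- ===== PORT A =====
-- dp[i][k] read: Python raises IndexError when out of range; the `.getD 0` default is
-- only reachable outside Pre_, where nothing is claimed.
def pvGet2 (dp : List (List Int)) (i k : Int) : Int :=
  (PySem.List.pyGet? ((PySem.List.pyGet? dp i).getD []) k).getD 0

-- dp[i][j] = v: every index A writes is ≥ 0 (loop variables start at 1), so toNat is exact;
-- an out-of-range write is an IndexError in Python, excluded by Pre_.
def pvSet2 (dp : List (List Int)) (i j : Int) (v : Int) : List (List Int) :=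
  dp.set i.toNat ((dp.getD i.toNat []).set j.toNat v)

def countSpecialSequences (m : Int) (n : Int) : Int :=
  let dp : List (List Int) := List.replicate (n + 1).toNat (List.replicate (m + 1).toNat 0)
  let dp := (PySem.List.pyRange 1 (m + 1) 1).foldl (fun dp j => pvSet2 dp 1 j 1) dp
  let dp := (PySem.List.pyRange 2 (n + 1) 1).foldl (fun dp i =>
    (PySem.List.pyRange 1 (m + 1) 1).foldl (fun dp j =>
      (PySem.List.pyRange 1 j 1).foldl (fun dp k =>
        pvSet2 dp i j (pvGet2 dp i j + pvGet2 dp (i - 1) k)) dp) dp) dp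
  (PySem.List.slice ((PySem.List.pyGet? dp n).getD []) (some 1) none).sum

-- ===== PORT B =====
def countSpecialSequences_alt (m : Int) (n : Int) : Int :=
  let row : List Int := 0 :: List.replicate m.toNat 1
  let row := (PySem.List.pyRange 0 (n - 1) 1).foldl (fun row _ =>
    ((PySem.List.pyRange 1 (m + 1) 1).foldl
      (fun (p : List Int × Int) j => (p.1 ++ [p.2], p.2 + (PySem.List.pyGet? row j).getD 0))
      ([0], 0)).1) row
  (PySem.List.slice row (some 1) none).sum

-- ===== PRECONDITION & SPEC =====
-- Pre_ excludes exactly the inputs on which A raises IndexError: n < 0 always raises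
-- (dp[1] or dp[n] out of range), and n = 0 with m ≥ 1 raises at dp[1][j] = 1.
def Pre_countSpecialSequences (m : Int) (n : Int) : Prop := 1 ≤ n ∨ (n = 0 ∧ m ≤ 0)
instance (m : Int) (n : Int) : Decidable (Pre_countSpecialSequences m n) := by
  unfold Pre_countSpecialSequences; infer_instance
def pvWitness_countSpecialSequences : Int × Int := (5, 3)

def Spec_countSpecialSequences (m : Int) (n : Int) (out : Int) : Prop := out = countSpecialSequences_alt m n
instance (m : Int) (n : Int) (out : Int) : Decidable (Spec_countSpecialSequences m n out) := by unfold Spec_countSpecialSequences; infer_instance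

-- ===== CLAIM (what is proved, stated in full; the proofs are below) =====
def Claim_equal_countSpecialSequences : Prop := ∀ (m : Int) (n : Int), Dom_countSpecialSequences m n → Pre_countSpecialSequences m n → Spec_countSpecialSequences m n (countSpecialSequences m n)

-- ===== LEMMAS AND PROOFS =====

-- the row recurrence both programs compute: pvRw M t has length M+1; its entry j (1 ≤ j ≤ M)
-- is row t+1 of A's table, and is what B's rolling row holds after t iterations
def pvZrow (M : Nat) : List Int := List.replicate (M + 1) 0
def pvPref (prev : List Int) (t : Nat) : Int := (prev.tail.take t).sum
def pvNextRow (M : Nat) (prev : List Int) : List Int := 0 :: (List.range M).map (pvPref prev)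
def pvRw (M : Nat) : Nat → List Int
  | 0 => 0 :: List.replicate M 1
  | s + 1 => pvNextRow M (pvRw M s)

-- A's dp table after the base row and s iterations of the outer loop
def pvDpSt (M N : Nat) : Nat → List (List Int)
  | 0 => (List.replicate (N + 1) (pvZrow M)).set 1 (pvRw M 0)
  | s + 1 => (pvDpSt M N s).set (s + 2) (pvRw M (s + 1))

-- partially-filled row i of A's table during the j-loop: entries 1..c done, entry c+1 holds v
def pvRowVal (M : Nat) (prev : List Int) (c : Nat) (v : Int) : List Int :=
  0 :: ((List.range c).map (pvPref prev) ++ v :: List.replicate (M - c - 1) 0)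

lemma pvRw_length (M s : Nat) : (pvRw M s).length = M + 1 := by
  cases s <;> simp [pvRw, pvNextRow]

lemma pvPref_succ (prev : List Int) (d : Nat) (hd : d < prev.tail.length) :
    pvPref prev (d + 1) = pvPref prev d + prev.tail.getD d 0 := by
  unfold pvPref
  rw [List.take_add_one]
  simp [List.getElem?_eq_getElem hd, List.getD_eq_getElem?_getD]

lemma pvFoldl_id {α β : Type} (f : α → β → α) (a : α) (h : ∀ x, f a x = a) (l : List β) :
    l.foldl f a = a := by
  induction l with
  | nil => rfl
  | cons x xs ih => simp [List.foldl, h x, ih]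

lemma pvSet_append_len {α : Type} (l₁ l₂ : List α) (x y : α) :
    (l₁ ++ x :: l₂).set l₁.length y = l₁ ++ y :: l₂ := by
  induction l₁ with
  | nil => rfl
  | cons a l ih => simp [List.set, ih]

lemma pvSet_rep_append {α : Type} (c : Nat) (l₂ : List α) (x y w : α) :
    (List.replicate c w ++ x :: l₂).set c y = List.replicate c w ++ y :: l₂ := by
  have := pvSet_append_len (List.replicate c w) l₂ x y
  simpa using this

lemma pvSet_getD_self {α : Type} (l : List α) (i : Nat) (d : α) (h : i < l.length) :
    l.set i (l.getD i d) = l := by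
  rw [List.getD_eq_getElem?_getD, List.getElem?_eq_getElem h]
  simp

lemma pvGetD_set_ne {α : Type} (l : List α) (i j : Nat) (h : i ≠ j) (v : α) (d : α) :
    (l.set i v).getD j d = l.getD j d := by
  simp [List.getD_eq_getElem?_getD, List.getElem?_set_ne h]

lemma pvGetD_set_self {α : Type} (l : List α) (i : Nat) (h : i < l.length) (v : α) (d : α) :
    (l.set i v).getD i d = v := by
  rw [List.getD_eq_getElem?_getD, List.getElem?_set_self (by simpa using h)]
  rfl

lemma pvSet_append_len' {α : Type} (c : Nat) (l₁ l₂ : List α) (h : l₁.length = c) (x y : α) :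
    (l₁ ++ x :: l₂).set c y = l₁ ++ y :: l₂ := by
  subst h; exact pvSet_append_len l₁ l₂ x y

lemma pvGet2_cast (dp : List (List Int)) (a b : Nat) :
    pvGet2 dp (a : Int) (b : Int) = (dp.getD a []).getD b 0 := by
  unfold pvGet2
  rw [PySem.List.pyGet?_natCast, List.getD_eq_getElem?_getD,
    PySem.List.pyGet?_natCast, List.getD_eq_getElem?_getD]

lemma pvSet2_cast (dp : List (List Int)) (a b : Nat) (v : Int) :
    pvSet2 dp (a : Int) (b : Int) v = dp.set a ((dp.getD a []).set b v) := by
  simp [pvSet2]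

lemma pvSet2_one (dp : List (List Int)) (b : Nat) (v : Int) :
    pvSet2 dp 1 (b : Int) v = dp.set 1 ((dp.getD 1 []).set b v) := by
  simp [pvSet2]

lemma pvBinner (M : Nat) (row : List Int) (hrow : row.length = M + 1) (c : Nat) (hc : c ≤ M) :
    (PySem.List.pyRange 1 ((c : Int) + 1) 1).foldl
      (fun (p : List Int × Int) j => (p.1 ++ [p.2], p.2 + (PySem.List.pyGet? row j).getD 0))
      ([0], 0)
    = (0 :: (List.range c).map (pvPref row), pvPref row c) := by
  induction c with
  | zero =>
      rw [show ((0:Nat):Int) + 1 = 1 by norm_num, PySem.List.pyRange_one_eq_nil le_rfl]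
      simp [pvPref]
  | succ c ih =>
      have hc' : c ≤ M := by omega
      have hsplit : PySem.List.pyRange 1 (((c+1 : Nat) : Int) + 1) 1
          = PySem.List.pyRange 1 ((c : Int) + 1) 1 ++ [(c : Int) + 1] := by
        push_cast
        exact PySem.List.pyRange_one_succ_right (by omega)
      rw [hsplit, List.foldl_append, ih hc']
      have htl : c < row.tail.length := by simp [hrow]; omega
      have hget : (PySem.List.pyGet? row ((c : Int) + 1)).getD 0 = row.tail.getD c 0 := by
        rw [show ((c : Int) + 1) = ((c + 1 : Nat) : Int) by push_cast; ring,
          PySem.List.pyGet?_natCast]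
        simp [List.getD_eq_getElem?_getD, List.getElem?_tail]
      simp only [List.foldl_cons, List.foldl_nil]
      rw [hget, ← pvPref_succ row c htl]
      simp [List.range_succ]

lemma pvBIter (m : Int) (M : Nat) (hm : m = (M : Int)) (t : Nat) :
    (PySem.List.pyRange 0 (t : Int) 1).foldl (fun row _ =>
      ((PySem.List.pyRange 1 (m + 1) 1).foldl
        (fun (p : List Int × Int) j => (p.1 ++ [p.2], p.2 + (PySem.List.pyGet? row j).getD 0))
        ([0], 0)).1) (pvRw M 0)
    = pvRw M t := by
  induction t with
  | zero => rw [show ((0:Nat):Int) = 0 by norm_num, PySem.List.pyRange_one_eq_nil le_rfl]; rfl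
  | succ t ih =>
      rw [show (((t+1:Nat)):Int) = (t:Int) + 1 by push_cast; ring,
        show PySem.List.pyRange 0 ((t:Int) + 1) 1 = PySem.List.pyRange 0 (t:Int) 1 ++ [(t:Int)]
          from PySem.List.pyRange_one_succ_right (Int.natCast_nonneg t),
        List.foldl_append, ih]
      simp only [List.foldl_cons, List.foldl_nil]
      rw [hm, pvBinner M (pvRw M t) (pvRw_length M t) M le_rfl]
      rfl

lemma pvB_main (m n : Int) (hm : 1 ≤ m) (hn : 1 ≤ n) :
    countSpecialSequences_alt m n = ((pvRw m.toNat (n.toNat - 1)).tail).sum := by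
  unfold countSpecialSequences_alt
  dsimp only
  have h1 : n - 1 = ((n.toNat - 1 : Nat) : Int) := by omega
  have h2 : m = (m.toNat : Int) := by omega
  have h0 : (0 : Int) :: List.replicate m.toNat 1 = pvRw m.toNat 0 := rfl
  rw [h0, h1, pvBIter m m.toNat h2 (n.toNat - 1), PySem.List.slice_from_one]

lemma pvB_m_nonpos (m n : Int) (hm : m ≤ 0) : countSpecialSequences_alt m n = 0 := by
  unfold countSpecialSequences_alt
  dsimp only
  have h0 : m.toNat = 0 := by omega
  have hnil : PySem.List.pyRange 1 (m + 1) 1 = [] := PySem.List.pyRange_one_eq_nil (by omega)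
  rw [h0, hnil]
  rw [pvFoldl_id _ _ (fun x => rfl)]
  simp [PySem.List.slice_from_one]

lemma pvDpSt_length (M N s : Nat) : (pvDpSt M N s).length = N + 1 := by
  induction s with
  | zero => simp [pvDpSt]
  | succ s ih => simp [pvDpSt, ih]

lemma pvDpSt_get_filled (M N s : Nat) (h : s + 1 ≤ N) :
    (pvDpSt M N s).getD (s + 1) [] = pvRw M s := by
  cases s with
  | zero =>
      simp [pvDpSt, List.getD_eq_getElem?_getD, List.getElem?_set_self, Nat.lt_succ_of_le h]
  | succ s =>
      have hl : s + 2 < (pvDpSt M N s).length := by rw [pvDpSt_length]; omega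
      simp [pvDpSt, List.getD_eq_getElem?_getD, List.getElem?_set_self, hl]

lemma pvDpSt_get_zero_row (M N s r : Nat) (h1 : s + 1 < r) (h2 : r ≤ N) :
    (pvDpSt M N s).getD r [] = pvZrow M := by
  induction s with
  | zero =>
      have : (1:Nat) ≠ r := by omega
      have hr : r < N + 1 := by omega
      simp [pvDpSt, List.getD_eq_getElem?_getD, List.getElem?_eq_getElem, hr,
        List.getElem_set_ne this, List.getElem_replicate]
  | succ s ih =>
      have hne : s + 2 ≠ r := by omega
      rw [pvDpSt, List.getD_eq_getElem?_getD, List.getElem?_set_ne hne,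
        ← List.getD_eq_getElem?_getD, ih (by omega)]

lemma pvRowVal_getD (M : Nat) (prev : List Int) (c : Nat) (v : Int) :
    (pvRowVal M prev c v).getD (c + 1) 0 = v := by
  unfold pvRowVal
  rw [List.getD_cons_succ, List.getD_eq_getElem?_getD,
    List.getElem?_append_right (by simp), ]
  simp

lemma pvRowVal_set (M : Nat) (prev : List Int) (c : Nat) (v v' : Int) :
    (pvRowVal M prev c v).set (c + 1) v' = pvRowVal M prev c v' := by
  unfold pvRowVal
  rw [List.set_cons_succ, pvSet_append_len' c _ _ (by simp)]

lemma pvGetD_tail (l : List Int) (d : Nat) :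
    l.tail.getD d 0 = l.getD (d + 1) 0 := by
  simp [List.getD_eq_getElem?_getD, List.getElem?_tail]

lemma pvAbase (M N : Nat) (hN : 1 ≤ N) (c : Nat) (hc : c ≤ M) :
    (PySem.List.pyRange 1 ((c : Int) + 1) 1).foldl (fun dp j => pvSet2 dp 1 j 1)
      (List.replicate (N + 1) (pvZrow M))
    = (List.replicate (N + 1) (pvZrow M)).set 1
        (0 :: (List.replicate c 1 ++ List.replicate (M - c) 0)) := by
  induction c with
  | zero =>
      rw [show ((0:Nat):Int) + 1 = 1 by norm_num, PySem.List.pyRange_one_eq_nil le_rfl]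
      have h1 : 1 < (List.replicate (N + 1) (pvZrow M)).length := by simp; omega
      have hgz : (List.replicate (N + 1) (pvZrow M)).getD 1 [] = pvZrow M := by
        have h2 : (1:Nat) < N + 1 := by omega
        simp [List.getD_eq_getElem?_getD, List.getElem?_replicate, h2]
      have := pvSet_getD_self (List.replicate (N + 1) (pvZrow M)) 1 [] h1
      rw [hgz] at this
      simp only [List.foldl_nil]
      rw [show (0:Int) :: (List.replicate 0 (1:Int) ++ List.replicate (M - 0) 0) = pvZrow M by
        simp [pvZrow, List.replicate_succ]]
      exact this.symm
  | succ c ih =>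
      have hc' : c ≤ M := by omega
      rw [show (((c+1:Nat)):Int) + 1 = ((c:Int) + 1) + 1 by push_cast; ring,
        show PySem.List.pyRange 1 ((c:Int) + 1 + 1) 1
            = PySem.List.pyRange 1 ((c:Int) + 1) 1 ++ [(c:Int) + 1] from
          PySem.List.pyRange_one_succ_right (by omega),
        List.foldl_append, ih hc']
      simp only [List.foldl_cons, List.foldl_nil]
      rw [show ((c:Int) + 1) = ((c+1:Nat) : Int) by push_cast; ring, pvSet2_one]
      set L := List.replicate (N + 1) (pvZrow M) with hL
      have hlen : 1 < L.length := by simp [hL]; omega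
      have hget : (L.set 1 (0 :: (List.replicate c 1 ++ List.replicate (M - c) 0))).getD 1 []
          = 0 :: (List.replicate c (1:Int) ++ List.replicate (M - c) 0) := by
        rw [List.getD_eq_getElem?_getD, List.getElem?_set_self (by simpa using hlen)]
        rfl
      rw [hget, List.set_set]
      congr 1
      have hrep : List.replicate (M - c) (0:Int) = 0 :: List.replicate (M - c - 1) 0 := by
        cases h : M - c with
        | zero => omega
        | succ k => rw [List.replicate_succ]; simp
      rw [hrep, List.set_cons_succ, pvSet_rep_append]
      rw [show M - (c+1) = M - c - 1 by omega]
      simp [List.replicate_succ']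

lemma pvAinner (M : Nat) (dp0 : List (List Int)) (s c : Nat) (prev : List Int)
    (hlen : s + 2 < dp0.length)
    (hprev : dp0.getD (s + 1) [] = prev)
    (hplen : prev.length = M + 1)
    (hcM : c < M)
    (d : Nat) (hd : d ≤ c) :
    (PySem.List.pyRange 1 ((d : Int) + 1) 1).foldl
      (fun dp k => pvSet2 dp ((s : Int) + 2) ((c : Int) + 1)
        (pvGet2 dp ((s : Int) + 2) ((c : Int) + 1) + pvGet2 dp ((s : Int) + 2 - 1) k))
      (dp0.set (s + 2) (pvRowVal M prev c 0))
    = dp0.set (s + 2) (pvRowVal M prev c (pvPref prev d)) := by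
  induction d with
  | zero =>
      rw [show ((0:Nat):Int) + 1 = 1 by norm_num, PySem.List.pyRange_one_eq_nil le_rfl]
      simp [pvPref]
  | succ d ih =>
      have hd' : d ≤ c := by omega
      rw [show (((d+1:Nat)):Int) + 1 = ((d:Int) + 1) + 1 by push_cast; ring,
        show PySem.List.pyRange 1 ((d:Int) + 1 + 1) 1
            = PySem.List.pyRange 1 ((d:Int) + 1) 1 ++ [(d:Int) + 1] from
          PySem.List.pyRange_one_succ_right (by omega),
        List.foldl_append, ih hd']
      simp only [List.foldl_cons, List.foldl_nil]
      rw [show ((s:Int) + 2 - 1) = ((s+1:Nat) : Int) by push_cast; ring]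
      rw [show ((s:Int) + 2) = ((s+2:Nat) : Int) by push_cast; ring,
        show ((c:Int) + 1) = ((c+1:Nat) : Int) by push_cast; ring,
        show ((d:Int) + 1) = ((d+1:Nat) : Int) by push_cast; ring]
      rw [pvGet2_cast, pvGet2_cast, pvSet2_cast]
      rw [pvGetD_set_self _ _ hlen, pvGetD_set_ne _ _ _ (by omega), hprev, pvRowVal_getD,
        List.set_set, pvRowVal_set]
      have htl : d < prev.tail.length := by simp [hplen]; omega
      rw [← pvGetD_tail, ← pvPref_succ prev d htl]

lemma pvAmiddle (M : Nat) (dp0 : List (List Int)) (s : Nat) (prev : List Int)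
    (hlen : s + 2 < dp0.length)
    (hprev : dp0.getD (s + 1) [] = prev)
    (hplen : prev.length = M + 1)
    (hzero : dp0.getD (s + 2) [] = pvZrow M)
    (c : Nat) (hc : c ≤ M) :
    (PySem.List.pyRange 1 ((c : Int) + 1) 1).foldl
      (fun dp j =>
        (PySem.List.pyRange 1 j 1).foldl
          (fun dp k => pvSet2 dp ((s : Int) + 2) j
            (pvGet2 dp ((s : Int) + 2) j + pvGet2 dp ((s : Int) + 2 - 1) k)) dp)
      dp0
    = dp0.set (s + 2) (0 :: ((List.range c).map (pvPref prev) ++ List.replicate (M - c) 0)) := by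
  induction c with
  | zero =>
      rw [show ((0:Nat):Int) + 1 = 1 by norm_num, PySem.List.pyRange_one_eq_nil le_rfl]
      have := pvSet_getD_self dp0 (s + 2) [] hlen
      rw [hzero] at this
      simpa [pvZrow] using this.symm
  | succ c ih =>
      have hc' : c ≤ M := by omega
      rw [show (((c+1:Nat)):Int) + 1 = ((c:Int) + 1) + 1 by push_cast; ring,
        show PySem.List.pyRange 1 ((c:Int) + 1 + 1) 1
            = PySem.List.pyRange 1 ((c:Int) + 1) 1 ++ [(c:Int) + 1] from
          PySem.List.pyRange_one_succ_right (by omega),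
        List.foldl_append, ih hc']
      simp only [List.foldl_cons, List.foldl_nil]
      have hrep : List.replicate (M - c) (0:Int) = 0 :: List.replicate (M - c - 1) 0 := by
        cases h : M - c with
        | zero => omega
        | succ k => rw [List.replicate_succ]; simp
      rw [show dp0.set (s+2) (0 :: ((List.range c).map (pvPref prev) ++ List.replicate (M - c) 0))
          = dp0.set (s+2) (pvRowVal M prev c 0) by rw [pvRowVal, hrep]]
      rw [pvAinner M dp0 s c prev hlen hprev hplen (by omega) c le_rfl]
      rw [pvRowVal, show M - (c+1) = M - c - 1 by omega]
      congr 2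
      simp [List.range_succ]

lemma pvAouter (M N : Nat) (hM : 1 ≤ M) (hN : 1 ≤ N) (t : Nat) (ht : t ≤ N - 1) :
    (PySem.List.pyRange 2 ((t : Int) + 2) 1).foldl
      (fun dp i =>
        (PySem.List.pyRange 1 ((M : Int) + 1) 1).foldl
          (fun dp j =>
            (PySem.List.pyRange 1 j 1).foldl
              (fun dp k => pvSet2 dp i j (pvGet2 dp i j + pvGet2 dp (i - 1) k)) dp) dp)
      (pvDpSt M N 0)
    = pvDpSt M N t := by
  induction t with
  | zero =>
      rw [show ((0:Nat):Int) + 2 = 2 by norm_num, PySem.List.pyRange_one_eq_nil le_rfl]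
      rfl
  | succ t ih =>
      have ht' : t ≤ N - 1 := by omega
      rw [show (((t+1:Nat)):Int) + 2 = ((t:Int) + 2) + 1 by push_cast; ring,
        show PySem.List.pyRange 2 ((t:Int) + 2 + 1) 1
            = PySem.List.pyRange 2 ((t:Int) + 2) 1 ++ [(t:Int) + 2] from
          PySem.List.pyRange_one_succ_right (by omega),
        List.foldl_append, ih ht']
      simp only [List.foldl_cons, List.foldl_nil]
      have hlen : t + 2 < (pvDpSt M N t).length := by rw [pvDpSt_length]; omega
      have hprev : (pvDpSt M N t).getD (t + 1) [] = pvRw M t :=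
        pvDpSt_get_filled M N t (by omega)
      have hzero : (pvDpSt M N t).getD (t + 2) [] = pvZrow M :=
        pvDpSt_get_zero_row M N t (t + 2) (by omega) (by omega)
      rw [pvAmiddle M (pvDpSt M N t) t (pvRw M t) hlen hprev (pvRw_length M t) hzero M le_rfl]
      rw [pvDpSt]
      congr 1
      simp [pvNextRow, pvRw]

lemma pvA_main (m n : Int) (hm : 1 ≤ m) (hn : 1 ≤ n) :
    countSpecialSequences m n = ((pvRw m.toNat (n.toNat - 1)).tail).sum := by
  unfold countSpecialSequences
  dsimp only
  set M := m.toNat with hM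
  set N := n.toNat with hN
  have hM1 : 1 ≤ M := by omega
  have hN1 : 1 ≤ N := by omega
  have hn1 : (n + 1).toNat = N + 1 := by omega
  have hm1 : (m + 1).toNat = M + 1 := by omega
  have hmc : m + 1 = (M : Int) + 1 := by omega
  have hnc : n + 1 = ((N - 1 : Nat) : Int) + 2 := by omega
  rw [hn1, hm1, show List.replicate (M+1) (0:Int) = pvZrow M from rfl, hmc,
    pvAbase M N hN1 M le_rfl,
    show (List.replicate (N + 1) (pvZrow M)).set 1
        (0 :: (List.replicate M 1 ++ List.replicate (M - M) 0)) = pvDpSt M N 0 by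
      simp [pvDpSt, pvRw],
    hnc, pvAouter M N hM1 hN1 (N - 1) le_rfl]
  have hget : PySem.List.pyGet? (pvDpSt M N (N - 1)) n = some (pvRw M (N - 1)) := by
    have hfill := pvDpSt_get_filled M N (N - 1) (by omega)
    rw [show N - 1 + 1 = N by omega] at hfill
    have hlt : N < (pvDpSt M N (N - 1)).length := by rw [pvDpSt_length]; omega
    rw [show n = (N : Int) by omega, PySem.List.pyGet?_natCast,
      List.getElem?_eq_getElem hlt]
    rw [List.getD_eq_getElem?_getD, List.getElem?_eq_getElem hlt] at hfill
    simpa using hfill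
  rw [hget, Option.getD_some, PySem.List.slice_from_one]

lemma pvA_m_nonpos (m n : Int) (hm : m ≤ 0) (hn : 0 ≤ n) : countSpecialSequences m n = 0 := by
  unfold countSpecialSequences
  dsimp only
  have hnil : PySem.List.pyRange 1 (m + 1) 1 = [] := PySem.List.pyRange_one_eq_nil (by omega)
  simp only [hnil, List.foldl_nil]
  rw [pvFoldl_id _ _ (fun x => rfl)]
  have hlt : n.toNat < (n + 1).toNat := by omega
  rw [PySem.List.pyGet?_of_nonneg _ hn, List.getElem?_replicate]
  simp only [hlt, if_pos]
  rw [Option.getD_some, PySem.List.slice_from_one]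
  simp [List.tail_replicate, List.sum_replicate]

-- ===== VERDICT (by name: the statement is the Claim_ definition above) =====
theorem countSpecialSequences_spec : Claim_equal_countSpecialSequences := by
  intro m n _ hpre
  unfold Spec_countSpecialSequences
  by_cases hm : m ≤ 0
  · have hn : 0 ≤ n := by rcases hpre with h | ⟨h, _⟩ <;> omega
    rw [pvA_m_nonpos m n hm hn, pvB_m_nonpos m n hm]
  · have hm1 : 1 ≤ m := by omega
    have hn1 : 1 ≤ n := by rcases hpre with h | ⟨h, h2⟩ <;> omega
    rw [pvA_main m n hm1 hn1, pvB_main m n hm1 hn1]
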